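-- pv_equiv track=rewrite | github.com/mdeeds/hardwired-design | scripts/debug_helper.py | order_nodes
-- ===== SOURCE A (Python) =====
-- def order_nodes(
--     headers: list[str],
--     print_nodes: list[str],
--     sweep_var: str | None,
-- ) -> tuple[list[str], list[str]]:
--     """Order nodes: .print/.probe first then rest.  Returns (all, primary)."""
--     exclude = {sweep_var.lower()} if sweep_var else set()
--     available = [h for h in headers if h.lower() not in exclude]
--
--     primary: list[str] = []
--     seen: set[str] = set()
--     for pn in print_nodes:
--         for h in available:
--             if h.lower() == pn and h.lower() not in seen:
--                 primary.append(h)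
--                 seen.add(h.lower())
--                 break
--
--     rest = [h for h in available if h.lower() not in seen]
--
--     if not primary:
--         return available, available
--     return primary + rest, primary
-- ===== SOURCE B (Python) =====
-- def order_nodes(
--     headers: list[str],
--     print_nodes: list[str],
--     sweep_var: str | None,
-- ) -> tuple[list[str], list[str]]:
--     """Order nodes: .print/.probe first then rest.  Returns (all, primary)."""
--     excluded = sweep_var.lower() if sweep_var else None
--     available = [h for h in headers if h.lower() != excluded]
--
--     rank: dict[str, int] = {}
--     for i, pn in enumerate(print_nodes):
--         rank.setdefault(pn, i)
--
--     matched: list[tuple[int, str]] = []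
--     seen: set[str] = set()
--     rest: list[str] = []
--     for h in available:
--         key = h.lower()
--         r = rank.get(key)
--         if r is None:
--             rest.append(h)
--         elif key not in seen:
--             matched.append((r, h))
--             seen.add(key)
--         # later duplicates of an already-matched key are dropped entirely
--
--     primary = [h for _, h in sorted(matched, key=lambda t: t[0])]
--     if not primary:
--         return available, available
--     return primary + rest, primary
-- ===== Notes on version B (the rewrite author's own statement) =====
-- stated objective: faster
-- what changed: Replaces A's nested scan (for each print node, rescan available) by a rank dict built once over print_nodes plus a single partitioning pass over available, sorting the matched bucket by rank to recover print_nodes order.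
import Mathlib
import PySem

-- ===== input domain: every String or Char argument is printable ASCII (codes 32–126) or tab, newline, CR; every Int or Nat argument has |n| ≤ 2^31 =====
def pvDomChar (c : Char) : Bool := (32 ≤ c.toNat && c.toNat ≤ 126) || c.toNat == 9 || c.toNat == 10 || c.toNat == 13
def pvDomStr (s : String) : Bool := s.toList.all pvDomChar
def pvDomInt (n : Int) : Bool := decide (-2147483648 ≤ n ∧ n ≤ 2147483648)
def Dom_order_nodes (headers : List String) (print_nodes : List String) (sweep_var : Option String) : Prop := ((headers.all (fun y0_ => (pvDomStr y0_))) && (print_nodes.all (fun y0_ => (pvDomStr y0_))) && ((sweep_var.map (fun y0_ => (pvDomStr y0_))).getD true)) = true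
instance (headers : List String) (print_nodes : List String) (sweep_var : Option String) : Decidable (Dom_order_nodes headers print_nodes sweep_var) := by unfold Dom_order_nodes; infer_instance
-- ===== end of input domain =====

-- B replaces A's nested scan (per print node, rescan `available`) by a rank dict over
-- print_nodes plus one partitioning pass over `available` whose matched bucket is sorted
-- by rank; objective: faster (quadratic nested scans become near-linear passes).


-- ===== PORT A =====
-- inner `for h in available: … break` loop of A
def pvFindA (available : List String) (pn : String) (seen : PySem.Set String) : Option String :=
  match available with
  | [] => none
  | h :: t =>
      if PySem.Str.lower h == pn && !(PySem.Set.contains seen (PySem.Str.lower h)) then some h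
      else pvFindA t pn seen

def order_nodes (headers : List String) (print_nodes : List String) (sweep_var : Option String) : List String × List String :=
  let exclude : PySem.Set String :=
    match sweep_var with
    | some s => if s ≠ "" then PySem.Set.ofList [PySem.Str.lower s] else PySem.Set.ofList []
    | none => PySem.Set.ofList []
  let available := headers.filter (fun h => !(PySem.Set.contains exclude (PySem.Str.lower h)))
  let st := print_nodes.foldl
    (fun (st : List String × PySem.Set String) pn =>
      match pvFindA available pn st.2 with
      | some h => (st.1 ++ [h], PySem.Set.add st.2 (PySem.Str.lower h))
      | none => st)
    ([], PySem.Set.ofList [])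
  let rest := available.filter (fun h => !(PySem.Set.contains st.2 (PySem.Str.lower h)))
  if st.1 = [] then (available, available) else (st.1 ++ rest, st.1)

-- ===== PORT B =====
def order_nodes_alt (headers : List String) (print_nodes : List String) (sweep_var : Option String) : List String × List String :=
  let excluded : Option String :=
    match sweep_var with
    | some s => if s ≠ "" then some (PySem.Str.lower s) else none
    | none => none
  let available := headers.filter (fun h => some (PySem.Str.lower h) != excluded)
  let rank : PySem.Dict String Int :=
    (PySem.List.enumerate print_nodes).foldl (fun d ip => PySem.Dict.setdefault d ip.2 ip.1) PySem.Dict.empty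
  let st := available.foldl
    (fun (st : List (Int × String) × PySem.Set String × List String) h =>
      match PySem.Dict.get? rank (PySem.Str.lower h) with
      | none => (st.1, st.2.1, st.2.2 ++ [h])
      | some r =>
          if PySem.Set.contains st.2.1 (PySem.Str.lower h) then st
          else (st.1 ++ [(r, h)], PySem.Set.add st.2.1 (PySem.Str.lower h), st.2.2))
    ([], PySem.Set.ofList [], [])
  let primary := (PySem.List.sorted st.1 (fun t => t.1)).map (fun t => t.2)
  if primary = [] then (available, available) else (primary ++ st.2.2, primary)

-- ===== PRECONDITION & SPEC =====
def Spec_order_nodes (headers : List String) (print_nodes : List String) (sweep_var : Option String) (out : List String × List String) : Prop := out = order_nodes_alt headers print_nodes sweep_var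
instance (headers : List String) (print_nodes : List String) (sweep_var : Option String) (out : List String × List String) : Decidable (Spec_order_nodes headers print_nodes sweep_var out) := by unfold Spec_order_nodes; infer_instance

-- ===== CLAIM (what is proved, stated in full; the proofs are below) =====
def Claim_equal_order_nodes : Prop := ∀ (headers : List String) (print_nodes : List String) (sweep_var : Option String), Dom_order_nodes headers print_nodes sweep_var → Spec_order_nodes headers print_nodes sweep_var (order_nodes headers print_nodes sweep_var)

-- ===== LEMMAS AND PROOFS =====

-- first index (from i) of key k in pns: the value rank assigns to k
def pvRankOf (pns : List String) (i : Int) (k : String) : Option Int :=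
  match pns with
  | [] => none
  | pn :: t => if pn = k then some i else pvRankOf t (i + 1) k

-- canonical matched list: pairs (first index of pn, first matching header), in print_nodes order
def pvCanon (av : List String) (pns : List String) (i : Int) (seenKeys : List String) : List (Int × String) :=
  match pns with
  | [] => []
  | pn :: t =>
      if pn ∈ seenKeys then pvCanon av t (i + 1) seenKeys
      else
        match av.find? (fun h => PySem.Str.lower h == pn) with
        | some h => (i, h) :: pvCanon av t (i + 1) (seenKeys ++ [pn])
        | none => pvCanon av t (i + 1) (seenKeys ++ [pn])

-- direct recursion computing B's loop (matched, rest)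
def pvScan (rank : PySem.Dict String Int) (av : List String) (s : PySem.Set String) :
    List (Int × String) × List String :=
  match av with
  | [] => ([], [])
  | h :: t =>
      match PySem.Dict.get? rank (PySem.Str.lower h) with
      | none => ((pvScan rank t s).1, h :: (pvScan rank t s).2)
      | some v =>
          if PySem.Str.lower h ∈ s then pvScan rank t s
          else ((v, h) :: (pvScan rank t (PySem.Set.add s (PySem.Str.lower h))).1,
                (pvScan rank t (PySem.Set.add s (PySem.Str.lower h))).2)

lemma pvScan_cons_none (rank : PySem.Dict String Int) (h : String) (t : List String)
    (s : PySem.Set String) (hg : PySem.Dict.get? rank (PySem.Str.lower h) = none) :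
    pvScan rank (h :: t) s = ((pvScan rank t s).1, h :: (pvScan rank t s).2) := by
  simp [pvScan, hg]

lemma pvScan_cons_skip (rank : PySem.Dict String Int) (h : String) (t : List String)
    (s : PySem.Set String) (v : Int) (hg : PySem.Dict.get? rank (PySem.Str.lower h) = some v)
    (hs : PySem.Str.lower h ∈ s) :
    pvScan rank (h :: t) s = pvScan rank t s := by
  simp [pvScan, hg, hs]

lemma pvScan_cons_take (rank : PySem.Dict String Int) (h : String) (t : List String)
    (s : PySem.Set String) (v : Int) (hg : PySem.Dict.get? rank (PySem.Str.lower h) = some v)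
    (hs : PySem.Str.lower h ∉ s) :
    pvScan rank (h :: t) s = ((v, h) :: (pvScan rank t (PySem.Set.add s (PySem.Str.lower h))).1,
      (pvScan rank t (PySem.Set.add s (PySem.Str.lower h))).2) := by
  simp [pvScan, hg, hs]

lemma pvCanon_cons_skip (av : List String) (pn : String) (t : List String) (i : Int)
    (sk : List String) (hm : pn ∈ sk) :
    pvCanon av (pn :: t) i sk = pvCanon av t (i + 1) sk := by
  simp [pvCanon, hm]

lemma pvCanon_cons_some (av : List String) (pn : String) (t : List String) (i : Int)
    (sk : List String) (h : String) (hm : pn ∉ sk)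
    (hf : List.find? (fun x => PySem.Str.lower x == pn) av = some h) :
    pvCanon av (pn :: t) i sk = (i, h) :: pvCanon av t (i + 1) (sk ++ [pn]) := by
  simp [pvCanon, hm, hf]

lemma pvCanon_cons_none (av : List String) (pn : String) (t : List String) (i : Int)
    (sk : List String) (hm : pn ∉ sk)
    (hf : List.find? (fun x => PySem.Str.lower x == pn) av = none) :
    pvCanon av (pn :: t) i sk = pvCanon av t (i + 1) (sk ++ [pn]) := by
  simp [pvCanon, hm, hf]

lemma pv_contains_isSome {d : PySem.Dict String Int} {k : String} :
    d.contains k = (d.get? k).isSome := by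
  cases d with | mk items =>
  induction items with
  | nil => rfl
  | cons p t ih =>
      simp [PySem.Dict.contains, PySem.Dict.get?, List.find?] at *
      cases hb : p.1 == k <;> simp [hb, ih]

lemma pv_rank_fold (pns : List String) (k : String) :
    ∀ (i : Int) (d : PySem.Dict String Int),
    ((PySem.List.enumerate pns i).foldl (fun d ip => PySem.Dict.setdefault d ip.2 ip.1) d).get? k
      = ((d.get? k).or (pvRankOf pns i k)) := by
  induction pns with
  | nil => intro i d; simp [PySem.List.enumerate, pvRankOf]
  | cons pn t ih =>
      intro i d
      have he : PySem.List.enumerate (pn :: t) i = (i, pn) :: PySem.List.enumerate t (i + 1) := rfl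
      rw [he, List.foldl_cons]
      have hstep := ih (i + 1) (PySem.Dict.setdefault d pn i)
      rw [hstep, pvRankOf]
      have hget : ∀ items : List (String × Int),
          (PySem.Dict.mk (items ++ [(pn, i)]) : PySem.Dict String Int).get? k
            = ((PySem.Dict.mk items : PySem.Dict String Int).get? k).or
                (if pn = k then some i else none) := by
        intro items
        induction items with
        | nil => by_cases hpk : pn = k <;> simp [PySem.Dict.get?, List.find?, hpk]
        | cons p ps ihp =>
            simp only [PySem.Dict.get?, List.cons_append, List.find?] at *
            cases hb : p.1 == k <;> simp [hb] at ihp ⊢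
            exact ihp
      unfold PySem.Dict.setdefault
      by_cases hc : d.contains pn = true
      · rw [if_pos hc]
        by_cases hpk : pn = k
        · subst hpk
          have hsome : (d.get? pn).isSome = true := by rw [← pv_contains_isSome]; exact hc
          obtain ⟨v, hv⟩ := Option.isSome_iff_exists.mp hsome
          simp [hv]
        · simp [hpk]
      · rw [if_neg hc]
        cases d with | mk items =>
        rw [hget items]
        by_cases hpk : pn = k <;> simp [hpk, Option.or_assoc]

lemma pv_rankOf_isSome (pns : List String) (k : String) :
    ∀ i : Int, (pvRankOf pns i k).isSome = true ↔ k ∈ pns := by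
  induction pns with
  | nil => simp [pvRankOf]
  | cons pn t ih =>
      intro i
      by_cases h : pn = k
      · simp [pvRankOf, h]
      · have h' : ¬k = pn := fun hk => h hk.symm
        simp [pvRankOf, h, ih (i + 1), h']

lemma pv_findA_eq (av : List String) (pn : String) (seen : PySem.Set String) :
    pvFindA av pn seen =
      if PySem.Set.contains seen pn then none else av.find? (fun h => PySem.Str.lower h == pn) := by
  induction av with
  | nil => simp [pvFindA]
  | cons h t ih =>
      rw [pvFindA, List.find?]
      cases hb : (PySem.Str.lower h == pn) with
      | false => simpa [hb] using ih
      | true =>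
          have heq : PySem.Str.lower h = pn := by simpa using hb
          by_cases hs : pn ∈ seen
          · have hs1 : PySem.Set.contains seen pn = true := by simpa [PySem.Set.contains] using hs
            simp [hb, heq, hs, hs1, ih]
          · have hs1 : PySem.Set.contains seen pn = false := by simpa [PySem.Set.contains] using hs
            simp [hb, heq, hs, hs1]

-- A's outer loop computes pvCanon's second components, and its final `seen` is characterised
lemma pv_loopA (av : List String) (pns : List String) :
    ∀ (acc : List String) (seenA : PySem.Set String) (seenKeys : List String) (i : Int),
    (∀ k, k ∈ seenA ↔ (k ∈ seenKeys ∧ (av.find? (fun h => PySem.Str.lower h == k)).isSome = true)) →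
    (pns.foldl
        (fun (st : List String × PySem.Set String) pn =>
          match pvFindA av pn st.2 with
          | some h => (st.1 ++ [h], PySem.Set.add st.2 (PySem.Str.lower h))
          | none => st)
        (acc, seenA)).1 = acc ++ (pvCanon av pns i seenKeys).map (fun p => p.2)
    ∧ ∀ k, k ∈ (pns.foldl
        (fun (st : List String × PySem.Set String) pn =>
          match pvFindA av pn st.2 with
          | some h => (st.1 ++ [h], PySem.Set.add st.2 (PySem.Str.lower h))
          | none => st)
        (acc, seenA)).2 ↔
        ((k ∈ seenKeys ∨ k ∈ pns) ∧ (av.find? (fun h => PySem.Str.lower h == k)).isSome = true) := by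
  induction pns with
  | nil =>
      intro acc seenA sk i H
      refine ⟨by simp [pvCanon], fun k => ?_⟩
      simp only [List.foldl_nil]
      rw [H k]
      simp
  | cons pn t ih =>
      intro acc seenA sk i H
      simp only [List.foldl_cons]
      rw [pv_findA_eq]
      by_cases hm : pn ∈ sk
      · have hnone : (if PySem.Set.contains seenA pn = true then none
            else List.find? (fun h => PySem.Str.lower h == pn) av) = none := by
          cases hf : List.find? (fun h => PySem.Str.lower h == pn) av with
          | none => split <;> simp [hf]
          | some h =>
              have hmem : pn ∈ seenA := (H pn).2 ⟨hm, by simp [hf]⟩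
              simp [PySem.Set.contains, hmem]
        rw [hnone]
        obtain ⟨ih1, ih2⟩ := ih acc seenA sk (i + 1) H
        refine ⟨?_, fun k => ?_⟩
        · rw [ih1, pvCanon, if_pos hm]
        · rw [ih2 k]
          constructor
          · rintro ⟨hk1, hk2⟩
            exact ⟨by rcases hk1 with h1 | h1 <;> simp [h1], hk2⟩
          · rintro ⟨hk1, hk2⟩
            refine ⟨?_, hk2⟩
            rcases hk1 with h1 | h1
            · exact Or.inl h1
            · rcases List.mem_cons.mp h1 with h2 | h2
              · exact Or.inl (h2 ▸ hm)
              · exact Or.inr h2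
      · have hnotA : pn ∉ seenA := fun hmem => hm ((H pn).1 hmem).1
        have hc : PySem.Set.contains seenA pn = false := by
          simpa [PySem.Set.contains] using hnotA
        rw [hc]
        simp only [Bool.false_eq_true, if_false]
        cases hf : List.find? (fun h => PySem.Str.lower h == pn) av with
        | some h =>
            have hkey : PySem.Str.lower h = pn := by
              have := List.find?_some hf
              simpa using this
            have H' : ∀ k, k ∈ PySem.Set.add seenA (PySem.Str.lower h) ↔
                (k ∈ sk ++ [pn] ∧ (av.find? (fun x => PySem.Str.lower x == k)).isSome = true) := by
              intro k
              rw [hkey, PySem.Set.mem_add]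
              constructor
              · rintro (hk | hk)
                · obtain ⟨h1, h2⟩ := (H k).1 hk
                  exact ⟨by simp [h1], h2⟩
                · subst hk
                  exact ⟨by simp, by simp [hf]⟩
              · rintro ⟨h1, h2⟩
                rcases List.mem_append.mp h1 with h3 | h3
                · exact Or.inl ((H k).2 ⟨h3, h2⟩)
                · exact Or.inr (by simpa using h3)
            obtain ⟨ih1, ih2⟩ := ih (acc ++ [h]) (PySem.Set.add seenA (PySem.Str.lower h)) (sk ++ [pn]) (i + 1) H'
            refine ⟨?_, fun k => ?_⟩
            · rw [ih1, pvCanon, if_neg hm, hf]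
              simp
            · rw [ih2 k]
              constructor
              · rintro ⟨hk1, hk2⟩
                refine ⟨?_, hk2⟩
                rcases hk1 with h1 | h1
                · rcases List.mem_append.mp h1 with h2 | h2
                  · exact Or.inl h2
                  · exact Or.inr (by simp [by simpa using h2])
                · exact Or.inr (by simp [h1])
              · rintro ⟨hk1, hk2⟩
                refine ⟨?_, hk2⟩
                rcases hk1 with h1 | h1
                · exact Or.inl (by simp [h1])
                · rcases List.mem_cons.mp h1 with h2 | h2
                  · exact Or.inl (by simp [h2])
                  · exact Or.inr h2
        | none =>
            have H' : ∀ k, k ∈ seenA ↔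
                (k ∈ sk ++ [pn] ∧ (av.find? (fun x => PySem.Str.lower x == k)).isSome = true) := by
              intro k
              constructor
              · rintro hk
                obtain ⟨h1, h2⟩ := (H k).1 hk
                exact ⟨by simp [h1], h2⟩
              · rintro ⟨h1, h2⟩
                rcases List.mem_append.mp h1 with h3 | h3
                · exact (H k).2 ⟨h3, h2⟩
                · exfalso
                  have : k = pn := by simpa using h3
                  rw [this, hf] at h2
                  simp at h2
            obtain ⟨ih1, ih2⟩ := ih acc seenA (sk ++ [pn]) (i + 1) H'
            refine ⟨?_, fun k => ?_⟩
            · rw [ih1, pvCanon, if_neg hm, hf]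
            · rw [ih2 k]
              constructor
              · rintro ⟨hk1, hk2⟩
                refine ⟨?_, hk2⟩
                rcases hk1 with h1 | h1
                · rcases List.mem_append.mp h1 with h2 | h2
                  · exact Or.inl h2
                  · exact Or.inr (by simp [by simpa using h2])
                · exact Or.inr (by simp [h1])
              · rintro ⟨hk1, hk2⟩
                refine ⟨?_, hk2⟩
                rcases hk1 with h1 | h1
                · exact Or.inl (by simp [h1])
                · rcases List.mem_cons.mp h1 with h2 | h2
                  · exact Or.inl (by simp [h2])
                  · exact Or.inr h2

-- B's loop equals pvScan
lemma pv_loopB (rank : PySem.Dict String Int) (av : List String) :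
    ∀ (m : List (Int × String)) (s : PySem.Set String) (r : List String),
    (av.foldl
        (fun (st : List (Int × String) × PySem.Set String × List String) h =>
          match PySem.Dict.get? rank (PySem.Str.lower h) with
          | none => (st.1, st.2.1, st.2.2 ++ [h])
          | some v =>
              if PySem.Set.contains st.2.1 (PySem.Str.lower h) then st
              else (st.1 ++ [(v, h)], PySem.Set.add st.2.1 (PySem.Str.lower h), st.2.2))
        (m, s, r)).1 = m ++ (pvScan rank av s).1
    ∧ (av.foldl
        (fun (st : List (Int × String) × PySem.Set String × List String) h =>
          match PySem.Dict.get? rank (PySem.Str.lower h) with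
          | none => (st.1, st.2.1, st.2.2 ++ [h])
          | some v =>
              if PySem.Set.contains st.2.1 (PySem.Str.lower h) then st
              else (st.1 ++ [(v, h)], PySem.Set.add st.2.1 (PySem.Str.lower h), st.2.2))
        (m, s, r)).2.2 = r ++ (pvScan rank av s).2 := by
  induction av with
  | nil => intro m s r; simp [pvScan]
  | cons h t ih =>
      intro m s r
      simp only [List.foldl_cons]
      rw [pvScan]
      cases hg : PySem.Dict.get? rank (PySem.Str.lower h) with
      | none => simpa [hg] using ih m s (r ++ [h])
      | some v =>
          by_cases hs : PySem.Str.lower h ∈ s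
          · have hs2 : PySem.Set.contains s (PySem.Str.lower h) = true := by
              simpa [PySem.Set.contains] using hs
            simpa [hg, hs2, hs] using ih m s r
          · have hs2 : PySem.Set.contains s (PySem.Str.lower h) = false := by
              simpa [PySem.Set.contains] using hs
            simpa [hg, hs2, hs] using ih (m ++ [(v, h)]) (PySem.Set.add s (PySem.Str.lower h)) r

lemma pv_scan_rest (rank : PySem.Dict String Int) (av : List String) :
    ∀ s, (pvScan rank av s).2 = av.filter (fun h => (PySem.Dict.get? rank (PySem.Str.lower h)).isNone) := by
  induction av with
  | nil => intro s; simp [pvScan]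
  | cons h t ih =>
      intro s
      rw [pvScan]
      cases hg : PySem.Dict.get? rank (PySem.Str.lower h) with
      | none => simp [List.filter, hg, ih]
      | some v =>
          by_cases hs : PySem.Str.lower h ∈ s <;> simp [List.filter, hg, hs, ih]

lemma pv_scan_mem (rank : PySem.Dict String Int) (av : List String) :
    ∀ (s : PySem.Set String) (p : Int × String),
    p ∈ (pvScan rank av s).1 ↔
      (PySem.Str.lower p.2 ∉ s ∧ rank.get? (PySem.Str.lower p.2) = some p.1 ∧
       av.find? (fun x => PySem.Str.lower x == PySem.Str.lower p.2) = some p.2) := by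
  induction av with
  | nil => intro s p; simp [pvScan]
  | cons h t ih =>
      intro s p
      rw [List.find?]
      cases hg : PySem.Dict.get? rank (PySem.Str.lower h) with
      | none =>
          rw [pvScan_cons_none rank h t s hg]
          cases hk : (PySem.Str.lower h == PySem.Str.lower p.2) with
          | true =>
              have heq : PySem.Str.lower h = PySem.Str.lower p.2 := by simpa using hk
              simp only
              constructor
              · intro hp
                have := ((ih s p).1 hp).2.1
                rw [← heq, hg] at this
                simp at this
              · rintro ⟨-, h2, -⟩
                rw [← heq, hg] at h2
                simp at h2
          | false => simpa using ih s p
      | some v =>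
          by_cases hs : PySem.Str.lower h ∈ s
          · rw [pvScan_cons_skip rank h t s v hg hs]
            cases hk : (PySem.Str.lower h == PySem.Str.lower p.2) with
            | true =>
                have heq : PySem.Str.lower h = PySem.Str.lower p.2 := by simpa using hk
                simp only
                constructor
                · intro hp
                  exact absurd (heq ▸ hs) ((ih s p).1 hp).1
                · rintro ⟨h1, -, -⟩
                  exact absurd (heq ▸ hs) h1
            | false => simpa using ih s p
          · rw [pvScan_cons_take rank h t s v hg hs]
            cases hk : (PySem.Str.lower h == PySem.Str.lower p.2) with
            | true =>
                have heq : PySem.Str.lower h = PySem.Str.lower p.2 := by simpa using hk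
                simp only [List.mem_cons]
                constructor
                · rintro (hp | hp)
                  · subst hp
                    exact ⟨heq ▸ hs, by rw [← heq, hg], rfl⟩
                  · have h1 := ((ih (PySem.Set.add s (PySem.Str.lower h)) p).1 hp).1
                    exact absurd (PySem.Set.mem_add _ _ _ |>.2 (Or.inr heq.symm)) h1
                · rintro ⟨h1, h2, h3⟩
                  have hp2 : p.2 = h := by cases h3; rfl
                  left
                  rw [← heq, hg] at h2
                  have hp1 : p.1 = v := by cases h2; rfl
                  cases p
                  simp_all
            | false =>
                have hne : PySem.Str.lower h ≠ PySem.Str.lower p.2 := by simpa using hk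
                simp only [List.mem_cons]
                rw [ih]
                constructor
                · rintro (hp | ⟨h1, h2, h3⟩)
                  · exact absurd (congrArg PySem.Str.lower (congrArg Prod.snd hp)).symm hne
                  · exact ⟨fun hor => h1 (PySem.Set.mem_add _ _ _ |>.2 (Or.inl hor)), h2, h3⟩
                · rintro ⟨h1, h2, h3⟩
                  right
                  refine ⟨fun hmem => ?_, h2, h3⟩
                  rcases (PySem.Set.mem_add _ _ _).1 hmem with hm1 | hm1
                  · exact h1 hm1
                  · exact hne hm1.symm

lemma pv_scan_pairwise (rank : PySem.Dict String Int) (av : List String) :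
    ∀ s, ((pvScan rank av s).1).Pairwise (fun a b => PySem.Str.lower a.2 ≠ PySem.Str.lower b.2) := by
  induction av with
  | nil => intro s; simp [pvScan]
  | cons h t ih =>
      intro s
      cases hg : PySem.Dict.get? rank (PySem.Str.lower h) with
      | none => rw [pvScan_cons_none rank h t s hg]; exact ih s
      | some v =>
          by_cases hs : PySem.Str.lower h ∈ s
          · rw [pvScan_cons_skip rank h t s v hg hs]; exact ih s
          · rw [pvScan_cons_take rank h t s v hg hs]
            refine List.Pairwise.cons (fun q hq => ?_) (ih _)
            have h1 := ((pv_scan_mem rank t _ q).1 hq).1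
            intro hcontra
            exact h1 (PySem.Set.mem_add _ _ _ |>.2 (Or.inr hcontra.symm))

lemma pv_canon_mem (av : List String) (pns : List String) :
    ∀ (i : Int) (seenKeys : List String) (p : Int × String),
    p ∈ pvCanon av pns i seenKeys ↔
      (pvRankOf pns i (PySem.Str.lower p.2) = some p.1 ∧ PySem.Str.lower p.2 ∉ seenKeys ∧
       av.find? (fun x => PySem.Str.lower x == PySem.Str.lower p.2) = some p.2) := by
  induction pns with
  | nil => intro i sk p; simp [pvCanon, pvRankOf]
  | cons pn t ih =>
      intro i sk p
      rw [pvRankOf]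
      by_cases hm : pn ∈ sk
      · rw [pvCanon_cons_skip av pn t i sk hm, ih]
        by_cases hpk : pn = PySem.Str.lower p.2
        · rw [if_pos hpk]
          constructor
          · rintro ⟨-, h2, -⟩
            exact absurd (hpk ▸ hm) h2
          · rintro ⟨-, h2, -⟩
            exact absurd (hpk ▸ hm) h2
        · rw [if_neg hpk]
      · by_cases hpk : pn = PySem.Str.lower p.2
        · rw [if_pos hpk]
          cases hf : List.find? (fun x => PySem.Str.lower x == pn) av with
          | some h =>
              rw [pvCanon_cons_some av pn t i sk h hm hf]
              simp only [List.mem_cons]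
              constructor
              · rintro (hp | hp)
                · have hp1 : p.1 = i := by cases hp; rfl
                  have hp2 : p.2 = h := by cases hp; rfl
                  refine ⟨by rw [hp1], hpk ▸ hm, ?_⟩
                  rw [← hpk, hf, hp2]
                · have := ((ih (i + 1) (sk ++ [pn]) p).1 hp).2.1
                  exact absurd (by simp [hpk]) this
              · rintro ⟨h1, h2, h3⟩
                rw [← hpk, hf] at h3
                have hp2 : p.2 = h := by cases h3; rfl
                have hp1 : p.1 = i := by cases h1; rfl
                left
                cases p
                simp_all
          | none =>
              rw [pvCanon_cons_none av pn t i sk hm hf]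
              constructor
              · intro hp
                have := ((ih (i + 1) (sk ++ [pn]) p).1 hp).2.1
                exact absurd (by simp [hpk]) this
              · rintro ⟨-, -, h3⟩
                rw [← hpk, hf] at h3
                simp at h3
        · rw [if_neg hpk]
          cases hf : List.find? (fun x => PySem.Str.lower x == pn) av with
          | some h =>
              rw [pvCanon_cons_some av pn t i sk h hm hf]
              simp only [List.mem_cons]
              rw [ih]
              constructor
              · rintro (hp | ⟨h1, h2, h3⟩)
                · exfalso
                  have hkey : PySem.Str.lower h = pn := by simpa using List.find?_some hf
                  have hp2 : p.2 = h := by cases hp; rfl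
                  exact hpk (by rw [← hkey, hp2])
                · exact ⟨h1, fun hmem => h2 (by simp [hmem]), h3⟩
              · rintro ⟨h1, h2, h3⟩
                right
                refine ⟨h1, fun hmem => ?_, h3⟩
                rcases List.mem_append.mp hmem with h4 | h4
                · exact h2 h4
                · have h5 : PySem.Str.lower p.2 = pn := by simpa using h4
                  exact hpk h5.symm
          | none =>
              rw [pvCanon_cons_none av pn t i sk hm hf, ih]
              constructor
              · rintro ⟨h1, h2, h3⟩
                exact ⟨h1, fun hmem => h2 (by simp [hmem]), h3⟩
              · rintro ⟨h1, h2, h3⟩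
                refine ⟨h1, fun hmem => ?_, h3⟩
                rcases List.mem_append.mp hmem with h4 | h4
                · exact h2 h4
                · have h5 : PySem.Str.lower p.2 = pn := by simpa using h4
                  exact hpk h5.symm

lemma pv_canon_fst_le (av : List String) (pns : List String) :
    ∀ (i : Int) (seenKeys : List String) (p : Int × String), p ∈ pvCanon av pns i seenKeys → i ≤ p.1 := by
  induction pns with
  | nil => intro i sk p hp; simp [pvCanon] at hp
  | cons pn t ih =>
      intro i sk p hp
      rw [pvCanon] at hp
      by_cases hm : pn ∈ sk
      · have := ih (i + 1) sk p (by simpa [hm] using hp)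
        omega
      · simp only [if_neg hm] at hp
        cases hf : List.find? (fun h => PySem.Str.lower h == pn) av with
        | some h =>
            rw [hf] at hp
            rcases List.mem_cons.1 hp with h1 | h2
            · subst h1; simp
            · have := ih (i + 1) (sk ++ [pn]) p h2; omega
        | none =>
            rw [hf] at hp
            have := ih (i + 1) (sk ++ [pn]) p hp; omega

lemma pv_canon_pairwise (av : List String) (pns : List String) :
    ∀ (i : Int) (seenKeys : List String),
    (pvCanon av pns i seenKeys).Pairwise (fun a b => a.1 < b.1) := by
  induction pns with
  | nil => intro i sk; simp [pvCanon]
  | cons pn t ih =>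
      intro i sk
      rw [pvCanon]
      by_cases hm : pn ∈ sk
      · simpa [hm] using ih (i + 1) sk
      · simp only [if_neg hm]
        cases hf : List.find? (fun h => PySem.Str.lower h == pn) av with
        | some h =>
            refine List.Pairwise.cons ?_ (ih (i + 1) (sk ++ [pn]))
            intro q hq
            have := pv_canon_fst_le av t (i + 1) (sk ++ [pn]) q hq
            simpa using by omega
        | none => exact ih (i + 1) (sk ++ [pn])

lemma pv_avail_eq (headers : List String) (sweep_var : Option String) :
    headers.filter (fun h => some (PySem.Str.lower h) !=
        (match sweep_var with
         | some s => if s ≠ "" then some (PySem.Str.lower s) else none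
         | none => none))
    = headers.filter (fun h => !(PySem.Set.contains
        (match sweep_var with
         | some s => if s ≠ "" then PySem.Set.ofList [PySem.Str.lower s] else PySem.Set.ofList []
         | none => PySem.Set.ofList []) (PySem.Str.lower h))) := by
  apply List.filter_congr
  intro h _
  cases sweep_var with
  | none => simp [PySem.Set.ofList, PySem.Set.contains]
  | some s =>
      by_cases hs : s = ""
      · simp [hs, PySem.Set.ofList, PySem.Set.contains]
      · simp only [hs, ne_eq, not_false_iff, if_pos]
        simp [PySem.Set.ofList, PySem.Set.contains, PySem.Set.add]
        cases hb : (PySem.Str.lower h == PySem.Str.lower s) <;> simp_all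

lemma pv_assemble (av pns : List String) :
    ((pns.foldl
        (fun (st : List String × PySem.Set String) pn =>
          match pvFindA av pn st.2 with
          | some h => (st.1 ++ [h], PySem.Set.add st.2 (PySem.Str.lower h))
          | none => st)
        ([], PySem.Set.ofList [])).1
      = (PySem.List.sorted
          ((av.foldl
              (fun (st : List (Int × String) × PySem.Set String × List String) h =>
                match PySem.Dict.get?
                    ((PySem.List.enumerate pns).foldl
                      (fun d ip => PySem.Dict.setdefault d ip.2 ip.1) PySem.Dict.empty)
                    (PySem.Str.lower h) with
                | none => (st.1, st.2.1, st.2.2 ++ [h])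
                | some r =>
                    if PySem.Set.contains st.2.1 (PySem.Str.lower h) then st
                    else (st.1 ++ [(r, h)], PySem.Set.add st.2.1 (PySem.Str.lower h), st.2.2))
              ([], PySem.Set.ofList [], [])).1) (fun t => t.1)).map (fun t => t.2))
    ∧ av.filter (fun h => !(PySem.Set.contains
        (pns.foldl
          (fun (st : List String × PySem.Set String) pn =>
            match pvFindA av pn st.2 with
            | some h => (st.1 ++ [h], PySem.Set.add st.2 (PySem.Str.lower h))
            | none => st)
          ([], PySem.Set.ofList [])).2 (PySem.Str.lower h)))
      = (av.foldl
          (fun (st : List (Int × String) × PySem.Set String × List String) h =>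
            match PySem.Dict.get?
                ((PySem.List.enumerate pns).foldl
                  (fun d ip => PySem.Dict.setdefault d ip.2 ip.1) PySem.Dict.empty)
                (PySem.Str.lower h) with
            | none => (st.1, st.2.1, st.2.2 ++ [h])
            | some r =>
                if PySem.Set.contains st.2.1 (PySem.Str.lower h) then st
                else (st.1 ++ [(r, h)], PySem.Set.add st.2.1 (PySem.Str.lower h), st.2.2))
          ([], PySem.Set.ofList [], [])).2.2 := by
  have hrget : ∀ k, PySem.Dict.get?
      ((PySem.List.enumerate pns).foldl
        (fun d ip => PySem.Dict.setdefault d ip.2 ip.1) PySem.Dict.empty) k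
      = pvRankOf pns 0 k := by
    intro k
    rw [pv_rank_fold pns k 0 PySem.Dict.empty]
    rfl
  obtain ⟨hB1, hB2⟩ := pv_loopB
    ((PySem.List.enumerate pns).foldl (fun d ip => PySem.Dict.setdefault d ip.2 ip.1) PySem.Dict.empty)
    av [] (PySem.Set.ofList []) []
  have H0 : ∀ k, k ∈ (PySem.Set.ofList [] : PySem.Set String) ↔
      (k ∈ ([] : List String) ∧ (av.find? (fun h => PySem.Str.lower h == k)).isSome = true) := by
    intro k; simp [PySem.Set.ofList]
  obtain ⟨hA1, hA2⟩ := pv_loopA av pns [] (PySem.Set.ofList []) [] 0 H0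
  have hnodupC : (pvCanon av pns 0 []).Nodup := by
    refine (pv_canon_pairwise av pns 0 []).imp ?_
    intro a b hab heq
    rw [heq] at hab
    omega
  have hnodupS : ((pvScan ((PySem.List.enumerate pns).foldl
      (fun d ip => PySem.Dict.setdefault d ip.2 ip.1) PySem.Dict.empty) av (PySem.Set.ofList [])).1).Nodup := by
    refine (pv_scan_pairwise _ av (PySem.Set.ofList [])).imp ?_
    intro a b hab heq
    rw [heq] at hab
    exact hab rfl
  have hperm : (pvCanon av pns 0 []).Perm
      (pvScan ((PySem.List.enumerate pns).foldl
        (fun d ip => PySem.Dict.setdefault d ip.2 ip.1) PySem.Dict.empty) av (PySem.Set.ofList [])).1 := by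
    rw [List.perm_ext_iff_of_nodup hnodupC hnodupS]
    intro p
    rw [pv_canon_mem, pv_scan_mem, hrget]
    simp [PySem.Set.ofList]
  have hsorted := PySem.List.sorted_eq_of_perm_of_pairwise_lt
    (pvScan ((PySem.List.enumerate pns).foldl
      (fun d ip => PySem.Dict.setdefault d ip.2 ip.1) PySem.Dict.empty) av (PySem.Set.ofList [])).1
    (pvCanon av pns 0 []) (fun t => t.1) hperm (pv_canon_pairwise av pns 0 [])
  constructor
  · rw [hA1, hB1]
    simp only [List.nil_append]
    rw [hsorted]
  · rw [hB2, pv_scan_rest]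
    simp only [List.nil_append]
    apply List.filter_congr
    intro h hmem
    have hfind : (av.find? (fun x => PySem.Str.lower x == PySem.Str.lower h)).isSome = true :=
      List.find?_isSome.2 ⟨h, hmem, by simp⟩
    have hseen := hA2 (PySem.Str.lower h)
    rw [hrget]
    by_cases hp : PySem.Str.lower h ∈ pns
    · have hin : PySem.Str.lower h ∈ (pns.foldl
          (fun (st : List String × PySem.Set String) pn =>
            match pvFindA av pn st.2 with
            | some h => (st.1 ++ [h], PySem.Set.add st.2 (PySem.Str.lower h))
            | none => st)
          ([], PySem.Set.ofList [])).2 := hseen.2 ⟨Or.inr hp, hfind⟩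
      have h1 : PySem.Set.contains (pns.foldl
          (fun (st : List String × PySem.Set String) pn =>
            match pvFindA av pn st.2 with
            | some h => (st.1 ++ [h], PySem.Set.add st.2 (PySem.Str.lower h))
            | none => st)
          ([], PySem.Set.ofList [])).2 (PySem.Str.lower h) = true := by
        simpa [PySem.Set.contains] using hin
      have h2 : (pvRankOf pns 0 (PySem.Str.lower h)).isSome = true :=
        (pv_rankOf_isSome pns (PySem.Str.lower h) 0).2 hp
      rw [h1]
      cases hr : pvRankOf pns 0 (PySem.Str.lower h) with
      | none => rw [hr] at h2; simp at h2
      | some v => simp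
    · have hnin : PySem.Str.lower h ∉ (pns.foldl
          (fun (st : List String × PySem.Set String) pn =>
            match pvFindA av pn st.2 with
            | some h => (st.1 ++ [h], PySem.Set.add st.2 (PySem.Str.lower h))
            | none => st)
          ([], PySem.Set.ofList [])).2 := by
        intro hin
        rcases (hseen.1 hin).1 with h3 | h3
        · simp at h3
        · exact hp h3
      have h1 : PySem.Set.contains (pns.foldl
          (fun (st : List String × PySem.Set String) pn =>
            match pvFindA av pn st.2 with
            | some h => (st.1 ++ [h], PySem.Set.add st.2 (PySem.Str.lower h))
            | none => st)
          ([], PySem.Set.ofList [])).2 (PySem.Str.lower h) = false := by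
        simpa [PySem.Set.contains] using hnin
      have h2 : pvRankOf pns 0 (PySem.Str.lower h) = none := by
        cases hr : pvRankOf pns 0 (PySem.Str.lower h) with
        | none => rfl
        | some v =>
            exact absurd ((pv_rankOf_isSome pns (PySem.Str.lower h) 0).1 (by simp [hr])) hp
      rw [h1, h2]
      simp

lemma pv_both (av pns : List String) :
    (let st := pns.foldl
        (fun (st : List String × PySem.Set String) pn =>
          match pvFindA av pn st.2 with
          | some h => (st.1 ++ [h], PySem.Set.add st.2 (PySem.Str.lower h))
          | none => st)
        ([], PySem.Set.ofList []);
     let rest := av.filter (fun h => !(PySem.Set.contains st.2 (PySem.Str.lower h)));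
     if st.1 = [] then (av, av) else (st.1 ++ rest, st.1))
    = (let rank : PySem.Dict String Int :=
        (PySem.List.enumerate pns).foldl (fun d ip => PySem.Dict.setdefault d ip.2 ip.1) PySem.Dict.empty;
       let st := av.foldl
        (fun (st : List (Int × String) × PySem.Set String × List String) h =>
          match PySem.Dict.get? rank (PySem.Str.lower h) with
          | none => (st.1, st.2.1, st.2.2 ++ [h])
          | some r =>
              if PySem.Set.contains st.2.1 (PySem.Str.lower h) then st
              else (st.1 ++ [(r, h)], PySem.Set.add st.2.1 (PySem.Str.lower h), st.2.2))
        ([], PySem.Set.ofList [], []);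
       let primary := (PySem.List.sorted st.1 (fun t => t.1)).map (fun t => t.2);
       if primary = [] then (av, av) else (primary ++ st.2.2, primary)) := by
  obtain ⟨h1, h2⟩ := pv_assemble av pns
  simp only
  rw [h1, h2]

-- ===== VERDICT (by name: the statement is the Claim_ definition above) =====
theorem order_nodes_spec : Claim_equal_order_nodes := by
  intro headers pns sv _
  unfold Spec_order_nodes order_nodes order_nodes_alt
  simp only
  rw [pv_avail_eq headers sv]
  exact pv_both _ pns
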